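-- pv_equiv track=rewrite | github.com/vtta2008/PLM | core/lauescript/invstring2.py | get_compounds
-- ===== SOURCE A (Python) =====
-- v = False
--
-- def get_compounds(invariom_map, invariom_names):
--     """
--     Links every invariom name to the name of the 'smallest'
--     model compound that it occurs in.
--
--     :param invariom_map: filepointer to the 'APD_MAP.txt' file
--     in the database directory.
--
--     :param invariom_names: list of invariom names ordered corresponding
--     to the atom names list passed to the interface functions.
--
--     :return: Dictionary keying model compound names to their
--     corresponding invariom names.
--     """
--     compounds_dict = {}
--     for line in invariom_map:
--         line = line.partition(':')
--         if any([line[0] == name for name in invariom_names]):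
--             compounds_dict[line[0]] = line[2].rstrip('\n')
--
--     missing = []
--     for name in invariom_names:
--         if not name in compounds_dict.keys():
--             missing.append(name)
--     if len(missing) > 0 and v:
--         printer('\nError: Not all invarioms found in Database.')
--         for miss in missing:
--             printer(miss)
--         printer()
--     return compounds_dict
-- ===== SOURCE B (Python) =====
-- def get_compounds(invariom_map, invariom_names):
--     """Parse the whole map file into a name -> compound dict first,
--     then keep only the entries for the requested invariom names."""
--     file_map = {}
--     for line in invariom_map:
--         name, _, compound = line.partition(':')
--         file_map[name] = compound.rstrip('\n')
--     wanted = set(invariom_names)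
--     return {name: compound
--             for name, compound in file_map.items() if name in wanted}
-- ===== Notes on version B (the rewrite author's own statement) =====
-- stated objective: faster
-- what changed: Instead of scanning lines with a per-line O(n) membership scan over the names list (plus a dead missing/printer pass), B first parses the whole file into a name->compound dict in one pass (last value wins) and then filters its items by a set of the wanted names.
import Mathlib
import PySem

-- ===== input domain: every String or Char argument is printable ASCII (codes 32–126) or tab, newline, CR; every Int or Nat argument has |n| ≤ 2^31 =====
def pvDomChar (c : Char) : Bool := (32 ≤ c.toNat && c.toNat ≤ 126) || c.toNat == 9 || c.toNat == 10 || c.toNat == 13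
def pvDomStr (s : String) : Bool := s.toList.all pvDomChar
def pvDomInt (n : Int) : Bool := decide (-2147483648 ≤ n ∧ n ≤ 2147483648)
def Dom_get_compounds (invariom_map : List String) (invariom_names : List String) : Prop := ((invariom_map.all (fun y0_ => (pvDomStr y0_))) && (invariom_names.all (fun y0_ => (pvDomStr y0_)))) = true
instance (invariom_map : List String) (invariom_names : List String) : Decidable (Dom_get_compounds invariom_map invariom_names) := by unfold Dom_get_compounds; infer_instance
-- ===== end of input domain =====

-- B parses the whole file into a dict first and then filters it by a set of the wanted names (A's dead 'missing' block is dropped); equivalence is about the return value.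

-- shared hand-ports of Python primitives PySem lacks:
-- s.partition(':') — exact: first ':' splits; no ':' gives ('', '') tail parts
def pyPartitionColon (s : String) : String × String × String :=
  let cs := s.toList
  let pre := cs.takeWhile (fun c => c ≠ ':')
  match cs.dropWhile (fun c => c ≠ ':') with
  | [] => (String.mk pre, "", "")
  | _ :: rest => (String.mk pre, ":", String.mk rest)

-- s.rstrip('\n') — exact: drop trailing newline characters
def pyRstripNewline (s : String) : String :=
  String.mk ((s.toList.reverse.dropWhile (fun c => c = '\n')).reverse)

-- ===== PORT A =====
def get_compounds (invariom_map : List String) (invariom_names : List String) : List (String × String) :=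
  let compounds := invariom_map.foldl (fun (d : PySem.Dict String String) line =>
    let t := pyPartitionColon line
    if invariom_names.any (fun name => t.1 == name) then d.insert t.1 (pyRstripNewline t.2.2) else d)
    PySem.Dict.empty
  -- dead code in A: 'missing' is computed but v = False, so the printer branch never runs
  let _missing := invariom_names.foldl (fun acc name => if compounds.contains name then acc else acc ++ [name]) ([] : List String)
  compounds.items

-- ===== PORT B =====
def get_compounds_alt (invariom_map : List String) (invariom_names : List String) : List (String × String) :=
  let file_map := invariom_map.foldl (fun (d : PySem.Dict String String) line =>
    let t := pyPartitionColon line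
    d.insert t.1 (pyRstripNewline t.2.2)) PySem.Dict.empty
  let wanted := PySem.Set.ofList invariom_names
  ((file_map.items.filter (fun p => PySem.Set.contains wanted p.1)).foldl
    (fun (d : PySem.Dict String String) p => d.insert p.1 p.2) PySem.Dict.empty).items

-- ===== PRECONDITION & SPEC =====
def Spec_get_compounds (invariom_map : List String) (invariom_names : List String) (out : List (String × String)) : Prop := out = get_compounds_alt invariom_map invariom_names
instance (invariom_map : List String) (invariom_names : List String) (out : List (String × String)) : Decidable (Spec_get_compounds invariom_map invariom_names out) := by unfold Spec_get_compounds; infer_instance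

-- ===== CLAIM (what is proved, stated in full; the proofs are below) =====
def Claim_equal_get_compounds : Prop := ∀ (invariom_map : List String) (invariom_names : List String), Dom_get_compounds invariom_map invariom_names → Spec_get_compounds invariom_map invariom_names (get_compounds invariom_map invariom_names)

-- ===== LEMMAS AND PROOFS =====

-- proof-side abbreviations
def pvParse (l : String) : String × String :=
  ((pyPartitionColon l).1, pyRstripNewline (pyPartitionColon l).2.2)

def pvPairs (m n : List String) : List (String × String) :=
  (m.map pvParse).filter (fun q => decide (q.1 ∈ n))

def pvInsFold (ps : List (String × String)) : PySem.Dict String String :=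
  ps.foldl (fun d p => d.insert p.1 p.2) PySem.Dict.empty

def pvLastVal (ps : List (String × String)) (k : String) : String :=
  ((ps.reverse.find? (fun p => p.1 == k)).map Prod.snd).getD ""

def pvSpine (ps : List (String × String)) : List (String × String) :=
  (PySem.List.dedup (ps.map Prod.fst)).map (fun k => (k, pvLastVal ps k))

theorem pvAnyBeq (n : List String) (k : String) :
    n.any (fun name => k == name) = decide (k ∈ n) := by
  induction n with
  | nil => simp
  | cons a l ih =>
    by_cases h : k = a <;> simp [h, ih]

theorem pvSetContains (n : List String) (k : String) :
    PySem.Set.contains (PySem.Set.ofList n) k = decide (k ∈ n) := by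
  by_cases h : k ∈ n
  · simp only [h, decide_true]
    exact (PySem.Set.contains_iff _ _).mpr ((PySem.Set.mem_ofList _ _).mpr h)
  · simp only [h, decide_false]
    exact Bool.eq_false_iff.mpr
      (fun hc => h ((PySem.Set.mem_ofList _ _).mp ((PySem.Set.contains_iff _ _).mp hc)))

theorem pvLastVal_append (ps : List (String × String)) (p : String × String) (k : String) :
    pvLastVal (ps ++ [p]) k = if p.1 == k then p.2 else pvLastVal ps k := by
  unfold pvLastVal
  rw [List.reverse_append]
  by_cases h : p.1 = k <;> simp [h]

theorem pvKeysInsFold (ps : List (String × String))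
    (h : (pvInsFold ps).items = pvSpine ps) :
    (pvInsFold ps).keys = PySem.List.dedup (ps.map Prod.fst) := by
  rw [PySem.Dict.keys, h]
  unfold pvSpine
  rw [List.map_map]
  have hid : ((fun x : String × String => x.1) ∘ fun k => (k, pvLastVal ps k)) = id := rfl
  rw [hid, List.map_id]

theorem pvMain (ps : List (String × String)) :
    (pvInsFold ps).items = pvSpine ps := by
  induction ps using List.reverseRecOn with
  | nil => simp [pvInsFold, pvSpine, PySem.Dict.empty, PySem.List.dedup]
  | append_singleton ps p IH =>
    have hfold : pvInsFold (ps ++ [p]) = (pvInsFold ps).insert p.1 p.2 := by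
      simp [pvInsFold]
    have hkeys := pvKeysInsFold ps IH
    have hcont : (pvInsFold ps).contains p.1 = decide (p.1 ∈ ps.map Prod.fst) := by
      rw [PySem.Dict.contains_eq_decide_mem_keys, hkeys]
      by_cases h : p.1 ∈ ps.map Prod.fst <;>
        simp [h]
    by_cases h : p.1 ∈ ps.map Prod.fst
    · -- key already present: in-place overwrite
      rw [hfold, PySem.Dict.items_insert_of_contains _ _ (by rw [hcont]; simp [h]), IH]
      unfold pvSpine
      have hded : PySem.List.dedup (ps.map Prod.fst ++ [p.1])
          = PySem.List.dedup (ps.map Prod.fst) := by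
        simp only [PySem.List.dedup_eq_ofList, PySem.Set.ofList_append_singleton]
        exact PySem.Set.add_of_mem ((PySem.Set.mem_ofList _ _).mpr h)
      simp only [List.map_append, List.map_cons, List.map_nil, hded, List.map_map]
      apply List.map_congr_left
      intro k _
      rw [pvLastVal_append]
      by_cases hk : k = p.1
      · simp [Function.comp, hk]
      · have : (p.1 == k) = false := by simp [Ne.symm hk]
        simp [Function.comp, this, hk]
    · -- new key: appended at the end
      rw [hfold, PySem.Dict.items_insert_of_not_contains _ _ (by rw [hcont]; simp [h]), IH]
      have hded : PySem.List.dedup (ps.map Prod.fst ++ [p.1])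
          = PySem.List.dedup (ps.map Prod.fst) ++ [p.1] := by
        simp only [PySem.List.dedup_eq_ofList, PySem.Set.ofList_append_singleton]
        exact PySem.Set.add_of_not_mem (fun hx => h ((PySem.Set.mem_ofList _ _).mp hx))
      simp only [pvSpine, List.map_append, List.map_cons, List.map_nil, hded]
      congr 1
      · apply List.map_congr_left
        intro k hkmem
        have hkps : k ∈ ps.map Prod.fst := (PySem.List.mem_dedup _ _).mp hkmem
        have hk : (p.1 == k) = false := by
          simp; rintro rfl; exact h hkps
        rw [pvLastVal_append, hk]
        simp
      · rw [pvLastVal_append]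
        simp

theorem pvA_eq (m n : List String) :
    get_compounds m n = (pvInsFold (pvPairs m n)).items := by
  unfold get_compounds pvInsFold pvPairs
  rw [List.foldl_filter, List.foldl_map]
  have hfun : (fun (d : PySem.Dict String String) line =>
      let t := pyPartitionColon line
      if n.any (fun name => t.1 == name) then d.insert t.1 (pyRstripNewline t.2.2) else d)
      = (fun (d : PySem.Dict String String) line =>
          if decide ((pvParse line).1 ∈ n) = true
          then d.insert (pvParse line).1 (pvParse line).2 else d) := by
    funext d line
    show (if n.any (fun name => (pyPartitionColon line).1 == name)
        then d.insert (pyPartitionColon line).1 (pyRstripNewline (pyPartitionColon line).2.2)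
        else d) = _
    rw [pvAnyBeq]
    by_cases h : (pvParse line).1 ∈ n <;> simp [pvParse, h]
  rw [hfun]

-- dedup commutes with a filter
theorem pvOfListFilter (l : List String) (P : String → Bool) :
    PySem.Set.ofList (l.filter P) = (PySem.Set.ofList l).filter P := by
  induction l using List.reverseRecOn with
  | nil => simp
  | append_singleton l x IH =>
    rw [List.filter_append, PySem.Set.ofList_append_singleton]
    by_cases hP : P x
    · have hmem : x ∈ PySem.Set.ofList l ↔ x ∈ l := PySem.Set.mem_ofList _ _
      by_cases h : x ∈ l
      · rw [PySem.Set.add_of_mem (hmem.mpr h)]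
        have : x ∈ l.filter P := List.mem_filter.mpr ⟨h, hP⟩
        have : PySem.Set.ofList (l.filter P ++ [x]) = PySem.Set.ofList (l.filter P) := by
          rw [PySem.Set.ofList_append_singleton]
          exact PySem.Set.add_of_mem ((PySem.Set.mem_ofList _ _).mpr this)
        simp [hP, this, IH]
      · rw [PySem.Set.add_of_not_mem (fun hx => h (hmem.mp hx))]
        have hx' : x ∉ l.filter P := fun hx => h (List.mem_filter.mp hx).1
        have : PySem.Set.ofList (l.filter P ++ [x])
            = PySem.Set.ofList (l.filter P) ++ [x] := by
          rw [PySem.Set.ofList_append_singleton]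
          exact PySem.Set.add_of_not_mem (fun hx => hx' ((PySem.Set.mem_ofList _ _).mp hx))
        simp [hP, this, IH]
    · by_cases h : x ∈ l
      · rw [PySem.Set.add_of_mem ((PySem.Set.mem_ofList _ _).mpr h)]
        simp [hP, IH]
      · rw [PySem.Set.add_of_not_mem (fun hx => h ((PySem.Set.mem_ofList _ _).mp hx))]
        simp [hP, IH]

theorem pvDedupFilter (l : List String) (P : String → Bool) :
    PySem.List.dedup (l.filter P) = (PySem.List.dedup l).filter P := by
  simp only [PySem.List.dedup_eq_ofList]
  exact pvOfListFilter l P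

theorem pvFindFilter (l : List (String × String)) (P : String → Bool) (k : String)
    (hk : P k = true) :
    (l.filter (fun q => P q.1)).find? (fun p => p.1 == k) = l.find? (fun p => p.1 == k) := by
  induction l with
  | nil => rfl
  | cons a l ih =>
    by_cases hP : P a.1
    · rw [List.filter_cons, if_pos hP]
      by_cases h : (a.1 == k) = true
      · rw [List.find?_cons_of_pos (p := fun q : String × String => q.1 == k) h,
          List.find?_cons_of_pos (p := fun q : String × String => q.1 == k) h]
      · rw [List.find?_cons_of_neg (p := fun q : String × String => q.1 == k) h,
          List.find?_cons_of_neg (p := fun q : String × String => q.1 == k) h, ih]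
    · rw [List.filter_cons, if_neg (by simp [hP])]
      have hne : ¬ (a.1 == k) = true := by
        simp
        rintro rfl
        rw [hk] at hP
        exact hP rfl
      rw [List.find?_cons_of_neg (p := fun q : String × String => q.1 == k) hne, ih]

theorem pvLastValFilter (ps : List (String × String)) (P : String → Bool) (k : String)
    (hk : P k = true) :
    pvLastVal (ps.filter (fun q => P q.1)) k = pvLastVal ps k := by
  unfold pvLastVal
  rw [← List.filter_reverse, pvFindFilter _ _ _ hk]

theorem pvSpineFilter (ps : List (String × String)) (P : String → Bool) :
    pvSpine (ps.filter (fun q => P q.1)) = (pvSpine ps).filter (fun q => P q.1) := by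
  unfold pvSpine
  have hkeys : (ps.filter (fun q => P q.1)).map Prod.fst = (ps.map Prod.fst).filter P := by
    induction ps with
    | nil => rfl
    | cons a l ih => by_cases h : P a.1 <;> simp [h, ih]
  rw [hkeys, pvDedupFilter]
  have hrhs : ((PySem.List.dedup (ps.map Prod.fst)).map (fun k => (k, pvLastVal ps k))).filter
        (fun q => P q.1)
      = ((PySem.List.dedup (ps.map Prod.fst)).filter P).map (fun k => (k, pvLastVal ps k)) := by
    induction PySem.List.dedup (ps.map Prod.fst) with
    | nil => rfl
    | cons a l ih => by_cases h : P a <;> simp [h, ih]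
  rw [hrhs]
  apply List.map_congr_left
  intro k hkmem
  have hPk : P k = true := (List.mem_filter.mp hkmem).2
  rw [pvLastValFilter _ _ _ hPk]

theorem pvMapLastVal (ps : List (String × String)) (hnd : (ps.map Prod.fst).Nodup) :
    (ps.map Prod.fst).map (fun k => (k, pvLastVal ps k)) = ps := by
  induction ps using List.reverseRecOn with
  | nil => rfl
  | append_singleton ps p IH =>
    have hnd' : (ps.map Prod.fst).Nodup := by
      rw [List.map_append] at hnd
      exact hnd.of_append_left
    have hpn : p.1 ∉ ps.map Prod.fst := by
      rw [List.map_append] at hnd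
      intro hk
      exact (List.disjoint_of_nodup_append hnd) hk (by simp)
    rw [List.map_append, List.map_cons, List.map_nil, List.map_append]
    congr 1
    · have hcongr : ∀ k ∈ ps.map Prod.fst,
          (k, pvLastVal (ps ++ [p]) k) = (k, pvLastVal ps k) := by
        intro k hk
        rw [pvLastVal_append]
        have hne : (p.1 == k) = false := by
          simp
          rintro rfl
          exact hpn hk
        rw [hne]
        simp
      rw [List.map_congr_left hcongr, IH hnd']
    · rw [List.map_cons, List.map_nil, pvLastVal_append]
      simp

theorem pvSpineNodup (ps : List (String × String)) (hnd : (ps.map Prod.fst).Nodup) :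
    pvSpine ps = ps := by
  unfold pvSpine
  rw [PySem.List.dedup_eq_ofList, PySem.Set.ofList_eq_self_of_nodup _ hnd]
  exact pvMapLastVal ps hnd

theorem pvInsFoldNodup (ps : List (String × String)) (hnd : (ps.map Prod.fst).Nodup) :
    (pvInsFold ps).items = ps := by
  rw [pvMain]
  exact pvSpineNodup ps hnd

theorem pvB_eq (m n : List String) :
    get_compounds_alt m n = (pvSpine (m.map pvParse)).filter (fun q => decide (q.1 ∈ n)) := by
  unfold get_compounds_alt
  have hfm : m.foldl (fun (d : PySem.Dict String String) line =>
        let t := pyPartitionColon line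
        d.insert t.1 (pyRstripNewline t.2.2))
      PySem.Dict.empty = pvInsFold (m.map pvParse) := by
    unfold pvInsFold
    rw [List.foldl_map]
    rfl
  simp only [hfm, pvMain]
  have hcontains : (fun (p : String × String) =>
        PySem.Set.contains (PySem.Set.ofList n) p.1) = (fun p => decide (p.1 ∈ n)) :=
    funext (fun p => pvSetContains n p.1)
  rw [hcontains]
  have hndkeys : (((pvSpine (m.map pvParse)).filter
        (fun q => decide (q.1 ∈ n))).map Prod.fst).Nodup := by
    have : (pvSpine (m.map pvParse)).map Prod.fst
        = PySem.List.dedup ((m.map pvParse).map Prod.fst) := by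
      unfold pvSpine
      rw [List.map_map]
      have hid : (Prod.fst ∘ fun k => (k, pvLastVal (m.map pvParse) k)) = id := rfl
      rw [hid, List.map_id]
    have hnd : ((pvSpine (m.map pvParse)).map Prod.fst).Nodup := by
      rw [this]
      exact PySem.List.nodup_dedup _
    have hsub : (((pvSpine (m.map pvParse)).filter (fun q => decide (q.1 ∈ n))).map Prod.fst).Sublist
        ((pvSpine (m.map pvParse)).map Prod.fst) :=
      List.filter_sublist.map Prod.fst
    exact hnd.sublist hsub
  exact pvInsFoldNodup _ hndkeys

-- ===== VERDICT (by name: the statement is the Claim_ definition above) =====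
theorem get_compounds_spec : Claim_equal_get_compounds := by
  intro m n _
  unfold Spec_get_compounds
  rw [pvA_eq, pvB_eq, pvMain]
  unfold pvPairs
  rw [pvSpineFilter (m.map pvParse) (fun x => decide (x ∈ n))]
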